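-- pv_equiv track=rewrite | github.com/JeongHPark/2022-Algorithm-Study | Programmers/jsh/21주차/숫자게임.py | solution
-- ===== SOURCE A (Python) =====
-- def solution(A, B):
--     answer = 0
--     A.sort(reverse=True)
--     B.sort(reverse=True)
--     start=0
--     for i in B:
--         while start!=len(A) and i<=A[start]:
--             start+=1
--         if start!=len(A):
--             answer+=1
--             start+=1
--         else:
--             break
--     return answer
-- ===== SOURCE B (Python) =====
-- def solution(A, B):
--     # Same in-place descending sorts as A (argument mutation preserved).
--     A.sort(reverse=True)
--     B.sort(reverse=True)
--     n, m = len(A), len(B)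
--
--     def ok(k):
--         # Can the k largest of B beat the k smallest of A pairwise?
--         # (descending lists: compare B[j] against A[n-k+j])
--         return all(B[j] > A[n - k + j] for j in range(k))
--
--     # ok is monotone (True for all k up to the answer, then False):
--     # binary search for the largest feasible k.
--     lo, hi = 0, min(n, m)
--     while lo < hi:
--         mid = (lo + hi + 1) // 2
--         if ok(mid):
--             lo = mid
--         else:
--             hi = mid - 1
--     return lo
-- ===== Notes on version B (the rewrite author's own statement) =====
-- stated objective: alternative
-- what changed: Replaces A's greedy pointer scan (for each B element skip unbeatable A elements, with an early break) by a Hall-style feasibility test -- can the k largest of B pairwise beat the k smallest of A -- which is monotone in k, and a binary search for the largest feasible k.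
import Mathlib
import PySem

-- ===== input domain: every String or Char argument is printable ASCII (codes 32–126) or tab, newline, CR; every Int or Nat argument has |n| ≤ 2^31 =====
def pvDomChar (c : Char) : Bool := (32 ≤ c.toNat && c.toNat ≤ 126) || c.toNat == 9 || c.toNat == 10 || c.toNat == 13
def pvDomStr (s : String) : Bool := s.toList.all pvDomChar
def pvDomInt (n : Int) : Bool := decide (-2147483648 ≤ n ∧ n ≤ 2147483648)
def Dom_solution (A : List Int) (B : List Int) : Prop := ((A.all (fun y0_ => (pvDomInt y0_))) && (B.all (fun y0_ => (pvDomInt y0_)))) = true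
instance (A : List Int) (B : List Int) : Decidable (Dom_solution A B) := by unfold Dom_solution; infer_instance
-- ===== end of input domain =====

-- B replaces A's greedy pointer scan over B (inner skip-while and early break) by a
-- different algorithm: a Hall-style feasibility test "the k largest of B pairwise beat
-- the k smallest of A", monotone in k, and a binary search for the largest feasible k.
-- Both versions sort their arguments in place identically; the equivalence proved here
-- is about the RETURN value.

-- ===== PORT A =====
-- the while loop: 'while start!=len(A) and i<=A[start]: start+=1'.
-- In every reachable state start ≤ len(A), so 'start != len(A)' is written as the
-- equivalent 'start < A.length' (a totality guard; A[start] is then in range).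
def solWhile (A : List Int) (i : Int) (start : Nat) : Nat :=
  if h : start < A.length ∧ i ≤ A.getD start 0 then solWhile A i (start + 1) else start
termination_by A.length - start
decreasing_by omega

-- the 'for i in B' loop with its early break, carrying (answer, start)
def solLoop (A : List Int) (bs : List Int) (answer : Int) (start : Nat) : Int :=
  match bs with
  | [] => answer
  | i :: rest =>
      let start' := solWhile A i start
      if start' ≠ A.length then solLoop A rest (answer + 1) (start' + 1) else answer

def solution (A : List Int) (B : List Int) : Int :=
  solLoop (PySem.List.sorted A (fun x => x) true) (PySem.List.sorted B (fun x => x) true) 0 0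

-- ===== PORT B =====
-- ok(k) = all(B[j] > A[n-k+j] for j in range(k)); every index the search probes is in
-- range (0 ≤ j < k ≤ min(n,m)), so getD is exact for Python's positive indexing here.
def altOk (a b : List Int) (k : Nat) : Bool :=
  (List.range k).all (fun j => decide (a.getD (a.length - k + j) 0 < b.getD j 0))

-- the binary-search loop: lo,hi with mid=(lo+hi+1)//2
def altSearch (a b : List Int) (lo hi : Nat) : Nat :=
  if h : lo < hi then
    if altOk a b ((lo + hi + 1) / 2) then altSearch a b ((lo + hi + 1) / 2) hi
    else altSearch a b lo ((lo + hi + 1) / 2 - 1)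
  else lo
termination_by hi - lo
decreasing_by
  · omega
  · omega

def solution_alt (A : List Int) (B : List Int) : Int :=
  let a := PySem.List.sorted A (fun x => x) true
  let b := PySem.List.sorted B (fun x => x) true
  ((altSearch a b 0 (min a.length b.length) : Nat) : Int)

-- ===== PRECONDITION & SPEC =====
def Spec_solution (A : List Int) (B : List Int) (out : Int) : Prop := out = solution_alt A B
instance (A : List Int) (B : List Int) (out : Int) : Decidable (Spec_solution A B out) := by unfold Spec_solution; infer_instance

-- ===== CLAIM (what is proved, stated in full; the proofs are below) =====
def Claim_equal_solution : Prop := ∀ (A : List Int) (B : List Int), Dom_solution A B → Spec_solution A B (solution A B)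

-- ===== LEMMAS AND PROOFS =====

-- list-level counterpart of A's loop: recursion on B, dropping unbeatable A elements
def fGreedy : List Int → List Int → Int
  | _, [] => 0
  | as, b :: bs =>
      match as.dropWhile (fun a => decide (b ≤ a)) with
      | [] => 0
      | _ :: as' => 1 + fGreedy as' bs

-- Nat-valued two-pointer greedy (first arg = remaining B, second = remaining A),
-- the stepping stone between A's loop and the max-k characterisation
def gN : List Int → List Int → Nat
  | _, [] => 0
  | [], _ :: as => gN [] as
  | b :: bs, a :: as => if a < b then 1 + gN bs as else gN (b :: bs) as

-- "the k largest of B pairwise beat the k smallest of A" (descending lists)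
def Pk (a b : List Int) (k : Nat) : Prop :=
  ∀ j < k, a.getD (a.length - k + j) 0 < b.getD j 0

-- r is the greatest feasible k
def Great (a b : List Int) (r : Nat) : Prop :=
  r ≤ min a.length b.length ∧ Pk a b r ∧
    ∀ k, k ≤ min a.length b.length → Pk a b k → k ≤ r

theorem solWhile_spec (A : List Int) (i : Int) :
    ∀ start, start ≤ A.length →
      solWhile A i start ≤ A.length ∧
      A.drop (solWhile A i start) = (A.drop start).dropWhile (fun a => decide (i ≤ a)) := by
  intro start hs
  induction' hn : A.length - start using Nat.strong_induction_on with n ih generalizing start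
  rw [solWhile]
  split_ifs with h
  · obtain ⟨hlt, hle⟩ := h
    have hdrop : A.drop start = A[start] :: A.drop (start + 1) :=
      List.drop_eq_getElem_cons hlt
    have hgd : A.getD start 0 = A[start] := by
      simp [List.getD_eq_getElem?_getD, List.getElem?_eq_getElem hlt]
    have := ih (A.length - (start + 1)) (by omega) (start + 1) (by omega) rfl
    refine ⟨this.1, ?_⟩
    rw [this.2, hdrop, List.dropWhile_cons]
    simp only [hgd] at hle
    simp [hle]
  · refine ⟨hs, ?_⟩
    rcases Nat.lt_or_ge start A.length with hlt | hge
    · have hdrop : A.drop start = A[start] :: A.drop (start + 1) :=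
        List.drop_eq_getElem_cons hlt
      have hgd : A.getD start 0 = A[start] := by
        simp [List.getD_eq_getElem?_getD, List.getElem?_eq_getElem hlt]
      have hni : ¬ i ≤ A[start] := by
        intro hc; exact h ⟨hlt, by rw [hgd]; exact hc⟩
      rw [hdrop, List.dropWhile_cons]
      simp [hni]
    · have : start = A.length := by omega
      simp [this, List.drop_length]

-- definitional unfolding of fGreedy on a cons, phrased via the computed dropWhile
theorem fGreedy_cons_of_drop {as bs : List Int} {b x : Int} {as' : List Int}
    (h : as.dropWhile (fun a => decide (b ≤ a)) = x :: as') :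
    fGreedy as (b :: bs) = 1 + fGreedy as' bs := by
  rw [fGreedy, h]

theorem fGreedy_cons_of_nil {as bs : List Int} {b : Int}
    (h : as.dropWhile (fun a => decide (b ≤ a)) = []) :
    fGreedy as (b :: bs) = 0 := by
  rw [fGreedy, h]

theorem solLoop_eq_fGreedy (A : List Int) :
    ∀ bs answer start, start ≤ A.length →
      solLoop A bs answer start = answer + fGreedy (A.drop start) bs := by
  intro bs
  induction bs with
  | nil => intro answer start _; simp [solLoop, fGreedy]
  | cons b rest ih =>
    intro answer start hs
    obtain ⟨hle, hdw⟩ := solWhile_spec A b start hs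
    rw [solLoop]
    by_cases hne : solWhile A b start ≠ A.length
    · have hlt : solWhile A b start < A.length := by omega
      have hdrop : A.drop (solWhile A b start)
          = A[solWhile A b start] :: A.drop (solWhile A b start + 1) :=
        List.drop_eq_getElem_cons hlt
      have h : (A.drop start).dropWhile (fun a => decide (b ≤ a))
          = A[solWhile A b start] :: A.drop (solWhile A b start + 1) :=
        hdw.symm.trans hdrop
      rw [if_pos hne, fGreedy_cons_of_drop h, ih (answer + 1) _ (by omega)]
      ring
    · have heq : solWhile A b start = A.length := by omega
      have h : (A.drop start).dropWhile (fun a => decide (b ≤ a)) = [] :=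
        hdw.symm.trans (by rw [heq, List.drop_length])
      rw [if_neg hne, fGreedy_cons_of_nil h]
      ring

theorem gN_nil_left (as : List Int) : gN [] as = 0 := by
  induction as with
  | nil => rfl
  | cons a rest ih => exact ih

theorem gN_nil_right (bs : List Int) : gN bs [] = 0 := by
  cases bs <;> rfl

theorem fGreedy_nil_right (as : List Int) : fGreedy as [] = 0 := by
  cases as <;> rfl

theorem fGreedy_nil_left (bs : List Int) : fGreedy [] bs = 0 := by
  cases bs <;> simp [fGreedy]

theorem fGreedy_eq_gN : ∀ as bs : List Int, fGreedy as bs = (gN bs as : Int) := by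
  intro as
  induction as with
  | nil => intro bs; rw [fGreedy_nil_left, gN_nil_right]; rfl
  | cons a as' ih =>
    intro bs
    cases bs with
    | nil => rw [fGreedy_nil_right, gN_nil_left]; rfl
    | cons b bs' =>
      by_cases hab : a < b
      · have h : (a :: as').dropWhile (fun x => decide (b ≤ x)) = a :: as' := by
          rw [List.dropWhile_cons]
          simp [show ¬ b ≤ a by omega]
        rw [fGreedy_cons_of_drop h, gN, if_pos hab, ih bs']
        push_cast
        ring
      · have hba : b ≤ a := by omega
        have hstep : fGreedy (a :: as') (b :: bs') = fGreedy as' (b :: bs') := by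
          rw [fGreedy, fGreedy, List.dropWhile_cons]
          simp [hba]
        rw [hstep, ih (b :: bs'), gN, if_neg hab]

-- descending list: later entries are ≤ earlier ones (getD form, in-range indices)
theorem desc_getD_le {a : List Int} (ha : a.Pairwise (fun x y => y ≤ x))
    {i j : Nat} (hij : i ≤ j) (hj : j < a.length) :
    a.getD j 0 ≤ a.getD i 0 := by
  have hi : i < a.length := lt_of_le_of_lt hij hj
  rw [List.getD_eq_getElem _ _ hj, List.getD_eq_getElem _ _ hi]
  rcases Nat.lt_or_ge i j with hlt | hge
  · exact (List.pairwise_iff_getElem.mp ha) i j hi hj hlt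
  · have : i = j := by omega
    subst this; exact le_refl _

-- Pk is antitone in k on a descending a
theorem Pk_antitone {a b : List Int} (ha : a.Pairwise (fun x y => y ≤ x))
    {k k' : Nat} (hkk : k ≤ k') (hk' : k' ≤ a.length) (hp : Pk a b k') : Pk a b k := by
  intro j hj
  have h1 := hp j (by omega)
  have h2 : a.getD (a.length - k + j) 0 ≤ a.getD (a.length - k' + j) 0 :=
    desc_getD_le ha (by omega) (by omega)
  omega

theorem gN_great (a : List Int) (ha : a.Pairwise (fun x y => y ≤ x)) :
    ∀ b : List Int, Great a b (gN b a) := by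
  induction a with
  | nil =>
    intro b
    rw [gN_nil_right]
    refine ⟨by simp, fun j hj => by omega, fun k hk _ => by simpa using hk⟩
  | cons a₀ as ih =>
    have ha₀ : ∀ x ∈ as, x ≤ a₀ := (List.pairwise_cons.mp ha).1
    have has : as.Pairwise (fun x y => y ≤ x) := (List.pairwise_cons.mp ha).2
    have ihs := ih has
    intro b
    cases b with
    | nil =>
      rw [gN_nil_left]
      refine ⟨by simp, fun j hj => by omega, fun k hk _ => by simpa using hk⟩
    | cons b₀ bs =>
      by_cases hab : a₀ < b₀
      · -- match: gN = 1 + gN bs as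
        obtain ⟨hr1, hr2, hr3⟩ := ihs bs
        set r := gN bs as with hrdef
        have hgn : gN (b₀ :: bs) (a₀ :: as) = r + 1 := by
          rw [gN, if_pos hab]; omega
        rw [hgn]
        have hlen : (a₀ :: as).length = as.length + 1 := by simp
        refine ⟨by simp; omega, ?_, ?_⟩
        · -- Pk (a₀::as) (b₀::bs) (r+1)
          intro j hj
          have hidx : (a₀ :: as).length - (r + 1) + j = as.length - r + j := by
            simp only [List.length_cons]; simp at hr1; omega
          rw [hidx]
          cases j with
          | zero =>
            simp only [Nat.add_zero]
            rcases Nat.eq_or_lt_of_le (show r ≤ as.length by simp at hr1; omega) with heq | hlt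
            · rw [show as.length - r = 0 by omega]
              simpa using hab
            · have h1 : as.length - r = (as.length - r - 1) + 1 := by omega
              rw [h1]
              have hin : as.length - r - 1 < as.length := by omega
              have : (a₀ :: as).getD ((as.length - r - 1) + 1) 0 = as.getD (as.length - r - 1) 0 := by
                simp
              rw [this]
              have hmem : as.getD (as.length - r - 1) 0 ∈ as := by
                rw [List.getD_eq_getElem _ _ hin]; exact List.getElem_mem hin
              have := ha₀ _ hmem
              simp only [List.getD_cons_zero]
              omega
          | succ j' =>
            have h1 : as.length - r + (j' + 1) = (as.length - r + j') + 1 := by omega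
            rw [h1]
            have := hr2 j' (by omega)
            simpa using this
        · -- maximality
          intro k hk hpk
          cases k with
          | zero => omega
          | succ k' =>
            simp only [hlen, List.length_cons] at hk
            have hk' : k' ≤ min as.length bs.length := by simp at hk ⊢; omega
            have hpk' : Pk as bs k' := by
              intro j hj
              have := hpk (j + 1) (by omega)
              have hidx : (a₀ :: as).length - (k' + 1) + (j + 1) = (as.length - k' + j) + 1 := by
                simp only [List.length_cons]; simp at hk'; omega
              rw [hidx] at this
              simpa using this
            have := hr3 k' hk' hpk'
            omega
      · -- skip a₀: gN = gN (b₀::bs) as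
        obtain ⟨hr1, hr2, hr3⟩ := ihs (b₀ :: bs)
        set r := gN (b₀ :: bs) as with hrdef
        have hgn : gN (b₀ :: bs) (a₀ :: as) = r := by
          rw [gN, if_neg hab]
        rw [hgn]
        have hba : b₀ ≤ a₀ := by omega
        refine ⟨by simp at hr1 ⊢; omega, ?_, ?_⟩
        · -- Pk (a₀::as) (b₀::bs) r
          intro j hj
          have hr_le : r ≤ as.length := by simp at hr1; omega
          have hidx : (a₀ :: as).length - r + j = (as.length - r + j) + 1 := by
            simp; omega
          rw [hidx]
          have := hr2 j hj
          simpa using this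
        · -- maximality
          intro k hk hpk
          have hkle : k ≤ as.length := by
            by_contra hgt
            have hkeq : k = as.length + 1 := by simp at hk; omega
            have := hpk 0 (by omega)
            rw [hkeq] at this
            have hidx : (a₀ :: as).length - (as.length + 1) + 0 = 0 := by simp
            rw [hidx] at this
            simp at this
            omega
          rcases Nat.eq_zero_or_pos k with hk0 | hkpos
          · omega
          · have hpk' : Pk as (b₀ :: bs) k := by
              intro j hj
              have := hpk j hj
              have hidx : (a₀ :: as).length - k + j = (as.length - k + j) + 1 := by
                simp; omega
              rw [hidx] at this
              simpa using this
            exact hr3 k (by simp at hk ⊢; omega) hpk'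

theorem altOk_iff (a b : List Int) (k : Nat) : altOk a b k = true ↔ Pk a b k := by
  unfold altOk Pk
  simp [List.all_eq_true, List.mem_range]

theorem altSearch_eq (a b : List Int) (ha : a.Pairwise (fun x y => y ≤ x)) (r : Nat)
    (hg : Great a b r) :
    ∀ lo hi, lo ≤ r → r ≤ hi → hi ≤ min a.length b.length → altSearch a b lo hi = r := by
  obtain ⟨hr1, hr2, hr3⟩ := hg
  intro lo hi
  induction' hn : hi - lo using Nat.strong_induction_on with n ih generalizing lo hi
  intro hlo hhi hmin
  rw [altSearch]
  split_ifs with h hok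
  · -- lo < hi, ok(mid) = true: lo := mid
    have hmid : lo < (lo + hi + 1) / 2 ∧ (lo + hi + 1) / 2 ≤ hi := by omega
    have hpk : Pk a b ((lo + hi + 1) / 2) := (altOk_iff a b _).mp hok
    have hle : (lo + hi + 1) / 2 ≤ r := hr3 _ (by omega) hpk
    exact ih (hi - (lo + hi + 1) / 2) (by omega) _ hi rfl hle hhi hmin
  · -- lo < hi, ok(mid) = false: hi := mid - 1
    have hmid : lo < (lo + hi + 1) / 2 ∧ (lo + hi + 1) / 2 ≤ hi := by omega
    have hnpk : ¬ Pk a b ((lo + hi + 1) / 2) := fun hp => hok ((altOk_iff a b _).mpr hp)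
    have hlt : r < (lo + hi + 1) / 2 := by
      by_contra hge
      exact hnpk (Pk_antitone ha (by omega) (by omega) hr2)
    exact ih ((lo + hi + 1) / 2 - 1 - lo) (by omega) lo _ rfl hlo (by omega) (by omega)
  · -- lo ≥ hi
    omega

-- ===== VERDICT (by name: the statement is the Claim_ definition above) =====
theorem solution_spec : Claim_equal_solution := by
  intro A B _
  unfold Spec_solution solution solution_alt
  have ha : (PySem.List.sorted A (fun x => x) true).Pairwise (fun x y => y ≤ x) :=
    PySem.List.sorted_pairwise_rev A (fun x => x)
  set a := PySem.List.sorted A (fun x => x) true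
  set b := PySem.List.sorted B (fun x => x) true
  have hg := gN_great a ha b
  have hs := altSearch_eq a b ha (gN b a) hg 0 (min a.length b.length)
    (Nat.zero_le _) hg.1 (le_refl _)
  rw [solLoop_eq_fGreedy a b 0 0 (Nat.zero_le _)]
  simp only [List.drop_zero, hs, fGreedy_eq_gN]
  ring
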